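-- pv_equiv track=rewrite | github.com/lololalayoho/Algo_share | 20210201/[3차] 방금 그 곡/lololalayoho.py | changeMelody
-- ===== SOURCE A (Python) =====
-- def changeMelody(Infos):
--     melodies = ['C', 'C#', 'D', 'D#', 'E', 'F', 'F#', 'G', 'G#', 'A', 'A#', 'B']
--     Info = ""
--     for index, i in enumerate(Infos):
--         melody = ""
--         if i != '#':
--             if index + 1 < len(Infos):
--                 if Infos[index + 1] == '#':
--                     melody = Infos[index] + '#'
--                 else:
--                     melody = Infos[index]
--             else:
--                 melody = i
--
--             if melody in melodies:
--                 if (melodies.index(melody) == 10):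
--                     Info = Info + 'A'
--                 elif (melodies.index(melody) == 11):
--                     Info = Info + 'B'
--                 else:
--                     Info = Info + str(melodies.index(melody))
--     return Info
-- ===== SOURCE B (Python) =====
-- def changeMelody(Infos):
--     base = {'C': 0, 'D': 2, 'E': 4, 'F': 5, 'G': 7, 'A': 9, 'B': 11}
--     out = ""
--     sharp = False
--     for c in reversed(Infos):
--         if c == '#':
--             sharp = True
--         else:
--             if c in base and not (sharp and c in 'EB'):
--                 idx = base[c] + sharp
--                 out = ('A' if idx == 10 else 'B' if idx == 11 else str(idx)) + out
--             sharp = False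
--     return out
-- ===== Notes on version B (the rewrite author's own statement) =====
-- stated objective: alternative
-- what changed: B scans the string once in reverse carrying a boolean flag (set by a sharp sign, consumed by the following letter), computes each code arithmetically as semitone base of the letter plus the flag from a 7-letter base map (dropping the two letter+sharp combinations that are not notes), and builds the output back-to-front by prepending; A scans forward with a one-character lookahead, builds a token, and finds its code by repeated .index scans of a 12-element list.
import Mathlib
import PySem

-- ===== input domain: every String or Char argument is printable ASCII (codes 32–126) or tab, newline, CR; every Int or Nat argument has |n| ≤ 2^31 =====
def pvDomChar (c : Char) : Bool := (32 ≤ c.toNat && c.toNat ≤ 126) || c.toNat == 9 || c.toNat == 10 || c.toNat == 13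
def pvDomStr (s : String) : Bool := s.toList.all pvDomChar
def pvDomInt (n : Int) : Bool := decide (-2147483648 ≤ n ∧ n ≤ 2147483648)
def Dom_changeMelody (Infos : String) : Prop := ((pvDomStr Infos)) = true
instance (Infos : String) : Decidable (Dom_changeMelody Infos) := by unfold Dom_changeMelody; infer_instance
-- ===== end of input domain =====

-- B replaces A's forward lookahead scan with list.index lookups by a single REVERSE scan
-- carrying a sharp flag and computing codes arithmetically; objective: alternative algorithm.

-- ===== PORT A =====
-- A, step for step: for index,i in enumerate(Infos): build melody by a one-char
-- lookahead into the whole string, test membership in the melodies list, and append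
-- the code computed from melodies.index(melody).  (Infos[index] is i itself.)
def pvMelodiesA : List (List Char) :=
  [['C'], ['C','#'], ['D'], ['D','#'], ['E'], ['F'], ['F','#'], ['G'], ['G','#'],
   ['A'], ['A','#'], ['B']]

def pvStepA (cs : List Char) (Info : List Char) (p : Int × Char) : List Char :=
  if p.2 ≠ '#' then
    let melody : List Char :=
      if p.1 + 1 < (cs.length : Int) then
        if PySem.List.pyGetD cs (p.1 + 1) ' ' = '#' then [p.2, '#'] else [p.2]
      else [p.2]
    if melody ∈ pvMelodiesA then
      match PySem.List.index? pvMelodiesA melody with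
      | some k => if k = 10 then Info ++ ['A']
                  else if k = 11 then Info ++ ['B']
                  else Info ++ PySem.Int.toChars (k : Int)
      | none => Info       -- unreachable: guarded by the membership test above
    else Info
  else Info

def changeMelody (Infos : String) : String :=
  String.ofList ((PySem.List.enumerate Infos.toList 0).foldl (pvStepA Infos.toList) [])

-- ===== PORT B =====
-- B: one reverse scan.  A '#' sets the sharp flag; a letter consumes it, computes the
-- code arithmetically from its semitone base (+1 if sharp, dropping non-notes E#/B#),
-- and prepends the code to the output built back-to-front.
def pvBaseB (c : Char) : Option Nat :=
  if c = 'C' then some 0 else if c = 'D' then some 2 else if c = 'E' then some 4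
  else if c = 'F' then some 5 else if c = 'G' then some 7 else if c = 'A' then some 9
  else if c = 'B' then some 11 else none

def pvEmitB (sh : Bool) (c : Char) : List Char :=
  match pvBaseB c with
  | some b =>
    if sh && (c = 'E' || c = 'B') then []
    else
      let idx := b + (if sh then 1 else 0)
      if idx = 10 then ['A'] else if idx = 11 then ['B'] else PySem.Int.toChars (idx : Int)
  | none => []

def pvStepB (st : Bool × List Char) (c : Char) : Bool × List Char :=
  if c = '#' then (true, st.2) else (false, pvEmitB st.1 c ++ st.2)

def changeMelody_alt (Infos : String) : String :=
  String.ofList (Infos.toList.reverse.foldl pvStepB (false, [])).2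

-- ===== PRECONDITION & SPEC =====
def Spec_changeMelody (Infos : String) (out : String) : Prop := out = changeMelody_alt Infos
instance (Infos : String) (out : String) : Decidable (Spec_changeMelody Infos out) := by unfold Spec_changeMelody; infer_instance

-- ===== CLAIM (what is proved, stated in full; the proofs are below) =====
def Claim_equal_changeMelody : Prop := ∀ (Infos : String), Dom_changeMelody Infos → Spec_changeMelody Infos (changeMelody Infos)

-- ===== LEMMAS AND PROOFS =====

-- the melody token A builds from a character and its successor
def pvMelodyOf (c : Char) (nxt : Option Char) : List Char :=
  if nxt = some '#' then [c, '#'] else [c]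

-- the code A appends for a candidate melody token
def pvCodeA (m : List Char) : List Char :=
  if m ∈ pvMelodiesA then
    match PySem.List.index? pvMelodiesA m with
    | some k => if k = 10 then ['A'] else if k = 11 then ['B'] else PySem.Int.toChars (k : Int)
    | none => []
  else []

-- A's result, written as a structural recursion on the char list
def pvG : List Char → List Char
  | [] => []
  | c :: rest =>
    (if c ≠ '#' then pvCodeA (pvMelodyOf c rest.head?) else []) ++ pvG rest

theorem pvStepA_eq (cs : List Char) (Info : List Char) (s : Nat) (c : Char) (rest : List Char)
    (h : cs.drop s = c :: rest) :
    pvStepA cs Info ((s : Int), c) =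
      Info ++ (if c ≠ '#' then pvCodeA (pvMelodyOf c rest.head?) else []) := by
  have hs : s < cs.length := by
    by_contra hge
    simp [List.drop_eq_nil_of_le (Nat.le_of_not_lt hge)] at h
  have hlen : cs.length = s + 1 + rest.length := by
    have := congrArg List.length h
    simp [List.length_drop] at this
    omega
  have h2 : cs.drop (s + 1) = rest := by
    have ht : cs.drop (s + 1) = (cs.drop s).tail := by rw [List.tail_drop]
    rw [ht, h]; rfl
  have hget : cs[s + 1]? = rest.head? := by
    rw [← List.head?_drop, h2]
  by_cases hc : c = '#'
  · simp [pvStepA, hc]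
  · rcases hrest : rest with _ | ⟨r, rs⟩
    · -- last character: index + 1 = length
      subst hrest
      have hl : ¬ ((s : Int) + 1 < (cs.length : Int)) := by
        rw [hlen]; push_cast; simp
      simp only [pvStepA, pvCodeA, pvMelodyOf, hl, if_false, hc, ne_eq, not_false_iff,
        if_true, List.head?_nil, reduceCtorEq]
      split
      · next hmem =>
        split
        · next k hk => split_ifs <;> simp
        · simp
      · simp
    · subst hrest
      have hl : ((s : Int) + 1 < (cs.length : Int)) := by
        have hpos : 0 < (r :: rs).length := Nat.succ_pos _
        rw [hlen]; push_cast; omega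
      have hcast : (s : Int) + 1 = ((s + 1 : Nat) : Int) := by push_cast; ring
      have hgetD : PySem.List.pyGetD cs ((s : Int) + 1) ' ' = r := by
        rw [hcast, PySem.List.pyGetD_natCast]
        simp [List.getD, hget]
      by_cases hr : r = '#'
      · simp only [pvStepA, pvCodeA, pvMelodyOf, hl, if_true, hc, ne_eq, not_false_iff,
          hgetD, hr, List.head?_cons]
        split
        · next hmem =>
          split
          · next k hk => split_ifs <;> simp
          · simp
        · simp
      · have hcond : ¬ (PySem.List.pyGetD cs ((s : Int) + 1) ' ' = '#') := by
          rw [hgetD]; exact hr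
        have hmel : ¬ ((some r : Option Char) = some '#') := by simp [hr]
        simp only [pvStepA, pvCodeA, pvMelodyOf, hl, if_true, hc, ne_eq, not_false_iff,
          hcond, if_false, List.head?_cons, hmel]
        split
        · next hmem =>
          split
          · next k hk => split_ifs <;> simp
          · simp
        · simp

theorem pvFoldA_eq (cs : List Char) :
    ∀ (tl : List Char) (s : Nat) (acc : List Char), cs.drop s = tl →
      (PySem.List.enumerate tl (s : Int)).foldl (pvStepA cs) acc = acc ++ pvG tl := by
  intro tl
  induction tl with
  | nil => intro s acc h; simp [PySem.List.enumerate_nil, pvG]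
  | cons c rest ih =>
    intro s acc h
    rw [PySem.List.enumerate_cons, List.foldl_cons, pvStepA_eq cs acc s c rest h]
    have hdrop : cs.drop (s + 1) = rest := by
      have ht : cs.drop (s + 1) = (cs.drop s).tail := by rw [List.tail_drop]
      rw [ht, h]; rfl
    have hcast : ((s : Int) + 1) = ((s + 1 : Nat) : Int) := by push_cast; ring
    rw [hcast, ih (s + 1) _ hdrop, pvG]
    simp [List.append_assoc]

-- B's arithmetic code for (letter, sharp flag) is exactly A's list-index code for the token
theorem pvEmit_eq (sh : Bool) (c : Char) :
    pvEmitB sh c = pvCodeA (if sh then [c, '#'] else [c]) := by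
  have h : pvBaseB c = none ∨ c = 'C' ∨ c = 'D' ∨ c = 'E' ∨ c = 'F' ∨ c = 'G' ∨ c = 'A' ∨ c = 'B' := by
    unfold pvBaseB; split_ifs with h1 h2 h3 h4 h5 h6 h7 <;> simp [*]
  rcases h with h | h | h | h | h | h | h | h
  · unfold pvBaseB at h
    split_ifs at h with h1 h2 h3 h4 h5 h6 h7
    cases sh <;>
      simp [pvEmitB, pvBaseB, h1, h2, h3, h4, h5, h6, h7, pvCodeA, pvMelodiesA]
  all_goals (subst h; cases sh <;> decide)

-- the reverse fold of B, read as a foldr, computes pvG plus the correct sharp flag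
theorem pvFoldB_eq (cs : List Char) :
    cs.foldr (fun c st => pvStepB st c) (false, []) =
      (decide (cs.head? = some '#'), pvG cs) := by
  induction cs with
  | nil => simp [pvG]
  | cons c rest ih =>
    rw [List.foldr_cons, ih]
    by_cases hc : c = '#'
    · subst hc; simp [pvStepB, pvG]
    · simp only [pvStepB, hc, if_false, pvG, ne_eq, not_false_iff, if_true,
        List.head?_cons, pvEmit_eq, pvMelodyOf]
      by_cases hh : rest.head? = some '#' <;> simp [hh, hc]

-- ===== VERDICT (by name: the statement is the Claim_ definition above) =====
theorem changeMelody_spec : Claim_equal_changeMelody := by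
  intro Infos _
  show _ = _
  unfold changeMelody changeMelody_alt
  rw [show (0 : Int) = ((0 : Nat) : Int) from rfl,
    pvFoldA_eq Infos.toList Infos.toList 0 [] (by simp),
    List.foldl_reverse, pvFoldB_eq]
  simp
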